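-- pv_equiv track=rewrite | github.com/baileyji/M2FS-Control | lib/orientalazd.py | merge_reg
-- ===== SOURCE A (Python) =====
-- def merge_reg(reg, bytewid=8,
--               rev=False):  # Seems like rev should default to true since OM has high byters at lower register addr
--     o = 0
--     if rev:
--         reg = reg[::-1]
--     for i, r in enumerate(reg):
--         o |= r << (i * bytewid)
--     return o
-- ===== SOURCE B (Python) =====
-- def merge_reg(reg, bytewid=8, rev=False):
--     # Horner scheme: consume registers from the high-order end, keeping one
--     # running accumulator shifted up by bytewid per step.
--     seq = reg if rev else reg[::-1]
--     if not seq: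
--         return 0
--     o = seq[0]
--     for r in seq[1:]:
--         o = (o << bytewid) | r
--     return o
-- ===== Notes on version B (the rewrite author's own statement) =====
-- stated objective: alternative
-- what changed: Replaces the enumerate loop with its per-element i*bytewid shift-and-OR into a fixed accumulator by a Horner fold that consumes the registers from the high-order end, updating a single running value o = (o << bytewid) | r.
import Mathlib
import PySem

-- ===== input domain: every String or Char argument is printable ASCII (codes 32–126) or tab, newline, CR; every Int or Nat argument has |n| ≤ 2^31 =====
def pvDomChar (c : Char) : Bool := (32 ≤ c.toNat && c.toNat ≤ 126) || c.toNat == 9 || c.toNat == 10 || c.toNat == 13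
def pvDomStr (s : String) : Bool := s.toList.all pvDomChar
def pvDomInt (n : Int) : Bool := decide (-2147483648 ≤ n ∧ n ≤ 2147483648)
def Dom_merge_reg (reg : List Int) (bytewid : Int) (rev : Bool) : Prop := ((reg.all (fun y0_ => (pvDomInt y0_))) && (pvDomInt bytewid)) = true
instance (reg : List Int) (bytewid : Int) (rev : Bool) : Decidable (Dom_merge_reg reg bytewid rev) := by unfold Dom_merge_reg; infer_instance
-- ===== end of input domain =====

-- B replaces A's enumerate loop with per-index shifts by a Horner fold from the
-- high-order end of the register list (alternative decomposition, same cost).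


-- ===== PORT A =====
-- 'r << (i * bytewid)': Lean's '<<<' takes a Nat shift, so '.toNat' appears; it is exact
-- because inside Pre_ every shift amount i*bytewid is ≥ 0 (Python raises ValueError on a
-- negative shift count).  'reg[::-1]' is the reversal 'reg.reverse'.
def merge_reg (reg : List Int) (bytewid : Int) (rev : Bool) : Int :=
  let reg' := if rev then reg.reverse else reg
  (PySem.List.enumerate reg').foldl
    (fun o ir => PySem.Int.bor o ((ir.2 : Int) <<< (ir.1 * bytewid).toNat)) 0

-- ===== PORT B =====
-- Source B: seq = reg if rev else reg[::-1]; if not seq: return 0; o = seq[0];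
--       for r in seq[1:]: o = (o << bytewid) | r
-- (same '.toNat' remark: the shift only runs when seq has ≥ 2 elements, where Pre_ gives 0 ≤ bytewid)
def merge_reg_alt (reg : List Int) (bytewid : Int) (rev : Bool) : Int :=
  let seq := if rev then reg else reg.reverse
  match seq with
  | [] => 0
  | h :: t => t.foldl (fun o r => PySem.Int.bor (o <<< bytewid.toNat) r) h

-- ===== PRECONDITION & SPEC =====
-- Python A raises ValueError (negative shift count) exactly when bytewid < 0 and reg has at
-- least two elements (index i ≥ 1 makes i*bytewid negative); only those inputs are excluded.
def Pre_merge_reg (reg : List Int) (bytewid : Int) (rev : Bool) : Prop :=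
  0 ≤ bytewid ∨ reg.length ≤ 1
instance (reg : List Int) (bytewid : Int) (rev : Bool) : Decidable (Pre_merge_reg reg bytewid rev) := by unfold Pre_merge_reg; infer_instance
def pvWitness_merge_reg : List Int × Int × Bool := ([1, 2, 255], 8, false)

def Spec_merge_reg (reg : List Int) (bytewid : Int) (rev : Bool) (out : Int) : Prop := out = merge_reg_alt reg bytewid rev
instance (reg : List Int) (bytewid : Int) (rev : Bool) (out : Int) : Decidable (Spec_merge_reg reg bytewid rev out) := by unfold Spec_merge_reg; infer_instance

-- ===== CLAIM (what is proved, stated in full; the proofs are below) =====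
def Claim_equal_merge_reg : Prop := ∀ (reg : List Int) (bytewid : Int) (rev : Bool), Dom_merge_reg reg bytewid rev → Pre_merge_reg reg bytewid rev → Spec_merge_reg reg bytewid rev (merge_reg reg bytewid rev)

-- ===== LEMMAS AND PROOFS =====

-- Bitwise toolkit: testBit characterisations of PySem.Int.bor and of '<<<' on Int, and
-- testBit-extensionality for Int; these give associativity of '|' and distribution of
-- '<<' over '|', the two algebraic facts the fold equivalence rests on.

theorem pv_and_add_ldiff (x : Nat) : ∀ m, (x &&& m) + x.ldiff m = x := by
  induction x using Nat.binaryRec' with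
  | zero =>
    intro m
    have : Nat.ldiff 0 m = 0 := by
      apply Nat.eq_of_testBit_eq; simp [Nat.testBit_ldiff]
    simp [this]
  | bit b n hb ih =>
    intro m
    rw [← Nat.bit_testBit_zero_shiftRight_one m, Nat.land_bit, Nat.ldiff_bit]
    simp only [Nat.bit_val]
    have := ih (m >>> 1)
    cases b <;> cases m.testBit 0 <;> simp <;> omega

theorem pv_sub_and_eq_ldiff (x m : Nat) : x - (x &&& m) = x.ldiff m := by
  have h := pv_and_add_ldiff x m; omega

theorem pv_neg_ofNat_sub_one (y : Nat) : -(y : Int) - 1 = Int.negSucc y := by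
  rw [Int.negSucc_eq]; omega

theorem pv_testBit_bor (a b : Int) (i : Nat) :
    (PySem.Int.bor a b).testBit i = (a.testBit i || b.testBit i) := by
  unfold PySem.Int.bor
  by_cases ha : 0 ≤ a <;> by_cases hb : 0 ≤ b
  · rw [if_pos ha, if_pos hb]
    obtain ⟨m, rfl⟩ := Int.eq_ofNat_of_zero_le ha
    obtain ⟨n, rfl⟩ := Int.eq_ofNat_of_zero_le hb
    simp [Int.testBit]
  · rw [if_pos ha, if_neg hb]
    obtain ⟨m, rfl⟩ := Int.eq_ofNat_of_zero_le ha
    obtain ⟨n, rfl⟩ : ∃ n : Nat, b = Int.negSucc n := ⟨(-b - 1).toNat, by omega⟩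
    have h1 : (-(Int.negSucc n) - 1).toNat = n := by rw [Int.negSucc_eq]; omega
    rw [h1, pv_sub_and_eq_ldiff, pv_neg_ofNat_sub_one]
    simp only [Int.testBit, Nat.testBit_ldiff, Int.toNat_natCast]
    cases m.testBit i <;> cases n.testBit i <;> rfl
  · rw [if_neg ha, if_pos hb]
    obtain ⟨n, rfl⟩ := Int.eq_ofNat_of_zero_le hb
    obtain ⟨m, rfl⟩ : ∃ m : Nat, a = Int.negSucc m := ⟨(-a - 1).toNat, by omega⟩
    have h1 : (-(Int.negSucc m) - 1).toNat = m := by rw [Int.negSucc_eq]; omega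
    rw [h1, pv_sub_and_eq_ldiff, pv_neg_ofNat_sub_one]
    simp only [Int.testBit, Nat.testBit_ldiff, Int.toNat_natCast]
    cases m.testBit i <;> cases n.testBit i <;> rfl
  · rw [if_neg ha, if_neg hb]
    obtain ⟨m, rfl⟩ : ∃ m : Nat, a = Int.negSucc m := ⟨(-a - 1).toNat, by omega⟩
    obtain ⟨n, rfl⟩ : ∃ n : Nat, b = Int.negSucc n := ⟨(-b - 1).toNat, by omega⟩
    have h1 : (-(Int.negSucc m) - 1).toNat = m := by rw [Int.negSucc_eq]; omega
    have h2 : (-(Int.negSucc n) - 1).toNat = n := by rw [Int.negSucc_eq]; omega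
    rw [h1, h2, pv_neg_ofNat_sub_one]
    simp only [Int.testBit, Nat.testBit_land]
    cases m.testBit i <;> cases n.testBit i <;> rfl

theorem pv_testBit_shiftLeft (a : Int) (k i : Nat) :
    (a <<< k).testBit i = (decide (k ≤ i) && a.testBit (i - k)) := by
  cases a with
  | ofNat m =>
    have h : (Int.ofNat m) <<< k = Int.ofNat (m <<< k) := by
      rw [Int.shiftLeft_eq, Nat.shiftLeft_eq]; exact_mod_cast rfl
    rw [h]
    simp only [Int.testBit, Nat.testBit_shiftLeft, ge_iff_le]
  | negSucc m =>
    have h1 : (Int.negSucc m) <<< k = Int.negSucc (2 ^ k * m + (2 ^ k - 1)) := by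
      rw [Int.shiftLeft_eq, Int.negSucc_eq, Int.negSucc_eq]
      have h2 : (1:ℕ) ≤ 2 ^ k := Nat.one_le_two_pow
      push_cast [h2]
      ring
    rw [h1]
    simp only [Int.testBit]
    rw [Nat.testBit_two_pow_mul_add m (Nat.sub_lt (Nat.two_pow_pos k) one_pos) i]
    by_cases h : i < k
    · simp [h, Nat.testBit_two_pow_sub_one, Nat.not_le.mpr h]
    · simp [h, Nat.le_of_not_lt h]

theorem pv_int_ext (a b : Int) (h : ∀ i, a.testBit i = b.testBit i) : a = b := by
  cases a with
  | ofNat m =>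
    cases b with
    | ofNat n => rw [Nat.eq_of_testBit_eq (fun i => h i)]
    | negSucc n =>
      exfalso
      have hi := h (m + n + 1)
      have h1 : m.testBit (m + n + 1) = false :=
        Nat.testBit_eq_false_of_lt (lt_of_lt_of_le Nat.lt_two_pow_self (Nat.pow_le_pow_right (by norm_num) (by omega)))
      have h2 : n.testBit (m + n + 1) = false :=
        Nat.testBit_eq_false_of_lt (lt_of_lt_of_le Nat.lt_two_pow_self (Nat.pow_le_pow_right (by norm_num) (by omega)))
      simp only [Int.testBit, h1, h2] at hi
      exact Bool.noConfusion hi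
  | negSucc m =>
    cases b with
    | ofNat n =>
      exfalso
      have hi := h (m + n + 1)
      have h1 : m.testBit (m + n + 1) = false :=
        Nat.testBit_eq_false_of_lt (lt_of_lt_of_le Nat.lt_two_pow_self (Nat.pow_le_pow_right (by norm_num) (by omega)))
      have h2 : n.testBit (m + n + 1) = false :=
        Nat.testBit_eq_false_of_lt (lt_of_lt_of_le Nat.lt_two_pow_self (Nat.pow_le_pow_right (by norm_num) (by omega)))
      simp only [Int.testBit, h1, h2] at hi
      exact Bool.noConfusion hi
    | negSucc n =>
      have : m = n := Nat.eq_of_testBit_eq (fun i => by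
        have hi := h i
        simp only [Int.testBit, Bool.not_inj_iff] at hi
        exact hi)
      rw [this]

theorem pv_bor_assoc (a b c : Int) :
    PySem.Int.bor (PySem.Int.bor a b) c = PySem.Int.bor a (PySem.Int.bor b c) := by
  apply pv_int_ext
  intro i
  simp [pv_testBit_bor, Bool.or_assoc]

theorem pv_shiftLeft_bor (a b : Int) (k : Nat) :
    (PySem.Int.bor a b) <<< k = PySem.Int.bor (a <<< k) (b <<< k) := by
  apply pv_int_ext
  intro i
  simp [pv_testBit_bor, pv_testBit_shiftLeft, Bool.and_or_distrib_left]

theorem pv_bor_zero_left (a : Int) : PySem.Int.bor 0 a = a := by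
  rw [PySem.Int.bor_comm]; exact PySem.Int.bor_zero a

-- Spec value of a high-order-first list: head shifted above the value of the tail.
def pvBval (w : Nat) : List Int → Int
  | [] => 0
  | r :: t => PySem.Int.bor (r <<< (t.length * w)) (pvBval w t)

-- B's Horner fold computes pvBval (acc sits above the whole remaining tail).
theorem pv_alt_fold (w : Nat) (t : List Int) (acc : Int) :
    t.foldl (fun o r => PySem.Int.bor (o <<< w) r) acc
      = PySem.Int.bor (acc <<< (t.length * w)) (pvBval w t) := by
  induction t generalizing acc with
  | nil => simp [pvBval, PySem.Int.bor_zero]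
  | cons r t ih =>
    simp only [List.foldl_cons, ih, pvBval, List.length_cons]
    rw [pv_shiftLeft_bor, pv_bor_assoc, ← Int.shiftLeft_add]
    congr 2
    ring

theorem pv_alt_eq_bval (w : Nat) (l : List Int) :
    (match l with
     | [] => (0 : Int)
     | h :: t => t.foldl (fun o r => PySem.Int.bor (o <<< w) r) h) = pvBval w l := by
  cases l with
  | nil => rfl
  | cons h t => simp only [pv_alt_fold, pvBval]

-- Spec value of a low-order-first list read from register index n upward.
def pvAval (w : Nat) : List Int → Nat → Int
  | [], _ => 0
  | r :: t, n => PySem.Int.bor (r <<< (n * w)) (pvAval w t (n + 1))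

-- A's enumerate fold computes pvAval (for 0 ≤ bytewid, where '.toNat' commutes with *).
theorem pv_a_fold (bytewid : Int) (hw : 0 ≤ bytewid) (l : List Int) (n : Nat) (acc : Int) :
    (PySem.List.enumerate l (n : Int)).foldl
        (fun o ir => PySem.Int.bor o ((ir.2 : Int) <<< (ir.1 * bytewid).toNat)) acc
      = PySem.Int.bor acc (pvAval bytewid.toNat l n) := by
  induction l generalizing n acc with
  | nil => simp [PySem.List.enumerate, pvAval, PySem.Int.bor_zero]
  | cons r t ih =>
    have hcast : ((n : Int) + 1) = ((n + 1 : Nat) : Int) := by push_cast; ring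
    have hsh : ((n : Int) * bytewid).toNat = n * bytewid.toNat := by
      rcases Int.eq_ofNat_of_zero_le hw with ⟨w, rfl⟩
      rw [← Int.natCast_mul, Int.toNat_natCast, Int.toNat_natCast]
    simp only [PySem.List.enumerate, List.foldl_cons, hcast, hsh]
    rw [ih, pvAval, pv_bor_assoc]

theorem pv_aval_append (w : Nat) (l : List Int) (x : Int) (n : Nat) :
    pvAval w (l ++ [x]) n = PySem.Int.bor (pvAval w l n) (x <<< ((n + l.length) * w)) := by
  induction l generalizing n with
  | nil => simp [pvAval, pv_bor_zero_left, PySem.Int.bor_zero]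
  | cons r t ih =>
    simp only [List.cons_append, pvAval, ih, List.length_cons]
    rw [pv_bor_assoc]
    have : n + 1 + t.length = n + (t.length + 1) := by omega
    rw [this]

theorem pv_aval_eq_bval_reverse (w : Nat) (l : List Int) :
    pvAval w l 0 = pvBval w l.reverse := by
  induction l using List.reverseRecOn with
  | nil => rfl
  | append_singleton l x ih =>
    rw [pv_aval_append, List.reverse_append]
    simp only [List.reverse_singleton, List.singleton_append, pvBval, List.length_reverse]
    rw [PySem.Int.bor_comm, ih]
    simp

-- ===== VERDICT (by name: the statement is the Claim_ definition above) =====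
theorem merge_reg_spec : Claim_equal_merge_reg := by
  intro reg bytewid rev _ hpre
  unfold Spec_merge_reg
  rcases hpre with hw | hlen
  · unfold merge_reg merge_reg_alt
    rw [pv_alt_eq_bval bytewid.toNat]
    have hA := pv_a_fold bytewid hw (if rev then reg.reverse else reg) 0 0
    rw [Nat.cast_zero] at hA
    rw [hA, pv_bor_zero_left, pv_aval_eq_bval_reverse]
    cases rev <;> simp
  · match reg, hlen with
    | [], _ => cases rev <;> rfl
    | [r], _ =>
      cases rev <;>
        simp [merge_reg, merge_reg_alt, PySem.List.enumerate, pv_bor_zero_left]
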